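-- pv_equiv track=rewrite | github.com/pixelatedempathy/ai | monitoring/conversation_quality_pattern_analyzer.py | _detect_repetitive_phrases
-- ===== SOURCE A (Python) =====
-- from collections import defaultdict, Counter
--
-- def _detect_repetitive_phrases(text: str) -> int:
--     """Detect repetitive phrases in text"""
--     words = text.lower().split()
--     phrase_counts = Counter()
--
--     # Check for 3-word phrases
--     for i in range(len(words) - 2):
--         phrase = ' '.join(words[i:i+3])
--         phrase_counts[phrase] += 1
--
--     # Count phrases that appear more than once
--     repetitive_count = sum(1 for count in phrase_counts.values() if count > 1)
--     return repetitive_count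
-- ===== SOURCE B (Python) =====
-- def _detect_repetitive_phrases(text: str) -> int:
--     """Detect repetitive phrases in text"""
--     words = text.lower().split()
--     phrases = sorted(' '.join(t) for t in zip(words, words[1:], words[2:]))
--     count = 0
--     prev = None
--     run = 1
--     for p in phrases:
--         if p == prev:
--             run += 1
--         else:
--             if run > 1:
--                 count += 1
--             run = 1
--         prev = p
--     if run > 1:
--         count += 1
--     return count
-- ===== Notes on version B (the rewrite author's own statement) =====
-- stated objective: alternative
-- what changed: Replaces the Counter-then-filter hashing approach by building trigrams via zip of shifted word lists, sorting them, and counting runs of length > 1 in one run-length scan over the sorted list.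
import Mathlib
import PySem

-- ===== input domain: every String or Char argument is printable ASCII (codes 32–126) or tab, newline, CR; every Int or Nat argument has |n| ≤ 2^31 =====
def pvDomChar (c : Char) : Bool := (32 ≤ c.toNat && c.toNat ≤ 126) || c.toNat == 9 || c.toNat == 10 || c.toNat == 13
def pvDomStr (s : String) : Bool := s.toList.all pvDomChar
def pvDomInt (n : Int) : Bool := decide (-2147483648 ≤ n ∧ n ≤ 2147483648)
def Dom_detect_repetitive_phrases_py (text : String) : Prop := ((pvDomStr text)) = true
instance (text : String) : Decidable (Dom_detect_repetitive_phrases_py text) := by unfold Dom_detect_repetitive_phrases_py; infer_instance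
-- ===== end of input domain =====

-- B replaces A's Counter-then-filter by zip-built trigrams, a sort, and a run-length
-- scan of the sorted list counting runs longer than 1; objective: alternative algorithm.

-- ===== PORT A =====
def detect_repetitive_phrases_py (text : String) : Int :=
  let words := PySem.Str.split₀ (PySem.Str.lower text)
  let phrase_counts :=
    (PySem.List.pyRange 0 (PySem.List.len words - 2) 1).foldl
      (fun d i =>
        PySem.Dict.modify d (PySem.Str.join " " (PySem.List.slice words (some i) (some (i + 3)))) 0 (· + 1))
      (PySem.Dict.empty : PySem.Dict String Int)
  (PySem.Dict.values phrase_counts).foldl (fun acc c => if 1 < c then acc + 1 else acc) 0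

-- ===== PORT B =====
def detect_repetitive_phrases_py_alt (text : String) : Int :=
  let words := PySem.Str.split₀ (PySem.Str.lower text)
  let phrases :=
    PySem.List.sorted
      ((words.zip ((words.drop 1).zip (words.drop 2))).map
        (fun t => PySem.Str.join " " [t.1, t.2.1, t.2.2]))
      (fun x => x) false
  let st :=
    phrases.foldl
      (fun (st : Int × Option String × Int) p =>
        if st.2.1 == some p then (st.1, some p, st.2.2 + 1)
        else ((if 1 < st.2.2 then st.1 + 1 else st.1), some p, 1))
      (0, none, 1)
  if 1 < st.2.2 then st.1 + 1 else st.1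

-- ===== PRECONDITION & SPEC =====
def Spec_detect_repetitive_phrases_py (text : String) (out : Int) : Prop := out = detect_repetitive_phrases_py_alt text
instance (text : String) (out : Int) : Decidable (Spec_detect_repetitive_phrases_py text out) := by unfold Spec_detect_repetitive_phrases_py; infer_instance

-- ===== CLAIM (what is proved, stated in full; the proofs are below) =====
def Claim_equal_detect_repetitive_phrases_py : Prop := ∀ (text : String), Dom_detect_repetitive_phrases_py text → Spec_detect_repetitive_phrases_py text (detect_repetitive_phrases_py text)

-- ===== LEMMAS AND PROOFS =====

/-- The list of 3-word phrases, structurally. -/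
def pvTrig : List String → List String
  | a :: b :: c :: t => PySem.Str.join " " [a, b, c] :: pvTrig (b :: c :: t)
  | _ => []

/-- Number of distinct elements of `l` occurring more than once. -/
def pvD (l : List String) : Int :=
  (((PySem.Set.ofList l).filter (fun k => decide (1 < l.count k))).length : Int)

/-- B's run-length scan, as a recursive function. -/
def pvScan (c : Int) (prev : Option String) (run : Int) : List String → Int
  | [] => if 1 < run then c + 1 else c
  | p :: t =>
      if prev == some p then pvScan c (some p) (run + 1) t
      else pvScan (if 1 < run then c + 1 else c) (some p) 1 t

/-- B's zip construction builds exactly the trigram list. -/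
lemma zip_eq_trig (w : List String) :
    (w.zip ((w.drop 1).zip (w.drop 2))).map
        (fun t => PySem.Str.join " " [t.1, t.2.1, t.2.2]) = pvTrig w := by
  induction w using pvTrig.induct with
  | case1 a b c t ih => simpa [pvTrig] using ih
  | case2 w h => match w, h with
    | [], _ => rfl
    | [a], _ => rfl
    | [a, b], _ => rfl
    | a :: b :: c :: t, h => exact (h a b c t rfl).elim

/-- A's index loop builds exactly the trigram list. -/
lemma range_slice_eq_trig (w : List String) :
    (PySem.List.pyRange 0 ((w.length : Int) - 2) 1).map
        (fun i => PySem.Str.join " " (PySem.List.slice w (some i) (some (i + 3)))) = pvTrig w := by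
  induction w using pvTrig.induct with
  | case1 a b c t ih =>
    have hlen : ((a :: b :: c :: t).length : Int) - 2 = (t.length : Int) + 1 := by
      simp; omega
    rw [hlen, PySem.List.pyRange_one_cons (by positivity), List.map_cons]
    have hhead : PySem.List.slice (a :: b :: c :: t) (some 0) (some (0 + 3)) = [a, b, c] := by
      rw [PySem.List.slice_toNat _ (by omega) (by omega)]; rfl
    rw [hhead]
    have htail : (PySem.List.pyRange (0 + 1) ((t.length : Int) + 1) 1).map
        (fun i => PySem.Str.join " " (PySem.List.slice (a :: b :: c :: t) (some i) (some (i + 3))))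
        = (PySem.List.pyRange 0 (((b :: c :: t).length : Int) - 2) 1).map
        (fun i => PySem.Str.join " " (PySem.List.slice (b :: c :: t) (some i) (some (i + 3)))) := by
      have hlen2 : ((b :: c :: t).length : Int) - 2 = (t.length : Int) := by simp; omega
      rw [hlen2, PySem.List.pyRange_one, PySem.List.pyRange_one, List.map_map, List.map_map]
      have harg : ((t.length : Int) + 1 - (0 + 1)).toNat = ((t.length : Int) - 0).toNat := by omega
      rw [harg]
      apply List.map_congr_left
      intro k hk
      simp only [Function.comp]
      congr 1
      have h1 : PySem.List.slice (a :: b :: c :: t) (some (0 + 1 + (k : Int))) (some (0 + 1 + (k : Int) + 3))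
          = List.take 3 (List.drop (k + 1) (a :: b :: c :: t)) := by
        rw [PySem.List.slice_toNat _ (by omega) (by omega)]
        have e1 : ((0 : Int) + 1 + (k : Int)).toNat = k + 1 := by omega
        rw [e1]
        have e2 : ((0 : Int) + 1 + (k : Int) + 3).toNat - (k + 1) = 3 := by omega
        rw [e2]
      have h2 : PySem.List.slice (b :: c :: t) (some (0 + (k : Int))) (some (0 + (k : Int) + 3))
          = List.take 3 (List.drop k (b :: c :: t)) := by
        rw [PySem.List.slice_toNat _ (by omega) (by omega)]
        have e1 : ((0 : Int) + (k : Int)).toNat = k := by omega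
        rw [e1]
        have e2 : ((0 : Int) + (k : Int) + 3).toNat - k = 3 := by omega
        rw [e2]
      rw [h1, h2]
      rfl
    rw [htail, ih]
    rfl
  | case2 w h => match w, h with
    | [], _ => rw [PySem.List.pyRange_one_eq_nil (by norm_num)]; rfl
    | [a], _ => rw [PySem.List.pyRange_one_eq_nil (by norm_num)]; rfl
    | [a, b], _ => rw [PySem.List.pyRange_one_eq_nil (by norm_num)]; rfl
    | a :: b :: c :: t, h => exact (h a b c t rfl).elim

/-- B's fold is the recursive scan. -/
lemma foldl_eq_scan (l : List String) (c : Int) (prev : Option String) (run : Int) :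
    (fun (st : Int × Option String × Int) => if 1 < st.2.2 then st.1 + 1 else st.1)
      (l.foldl
        (fun (st : Int × Option String × Int) p =>
          if st.2.1 == some p then (st.1, some p, st.2.2 + 1)
          else ((if 1 < st.2.2 then st.1 + 1 else st.1), some p, 1))
        (c, prev, run))
    = pvScan c prev run l := by
  induction l generalizing c prev run with
  | nil => rfl
  | cons p t ih =>
    rw [List.foldl_cons, pvScan]
    by_cases h : prev == some p
    · rw [if_pos h, if_pos h]; exact ih _ _ _
    · rw [if_neg h, if_neg h]; exact ih _ _ _

/-- The scan's count accumulator is additive. -/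
lemma pvScan_add (l : List String) (c : Int) (prev : Option String) (run : Int) :
    pvScan c prev run l = c + pvScan 0 prev run l := by
  induction l generalizing c prev run with
  | nil => simp only [pvScan]; split <;> ring
  | cons p t ih =>
    simp only [pvScan]
    split
    · rw [ih c]
    · split
      · rw [ih (c + 1), ih (0 + 1)]; ring
      · rw [ih c]

/-- Scanning a block of copies of the previous element just extends the run. -/
lemma pvScan_replicate (m : Nat) (c : Int) (a : String) (run : Int) (rest : List String) :
    pvScan c (some a) run (List.replicate m a ++ rest) = pvScan c (some a) (run + m) rest := by
  induction m generalizing run with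
  | zero => simp
  | succ m ih =>
    rw [List.replicate_succ, List.cons_append, pvScan, if_pos (by simp)]
    rw [ih (run + 1)]
    congr 1
    push_cast
    ring

/-- `pvD l` can be computed from any nodup list with `l`'s members. -/
lemma pvD_eq_of (l ds : List String) (h1 : ds.Nodup) (h2 : ∀ x, x ∈ ds ↔ x ∈ l) :
    pvD l = ((ds.filter (fun k => decide (1 < l.count k))).length : Int) := by
  unfold pvD
  congr 1
  apply List.Perm.length_eq
  apply List.Perm.filter
  apply (List.perm_ext_iff_of_nodup (PySem.Set.nodup_ofList l) h1).2
  intro x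
  rw [PySem.Set.mem_ofList, h2]

/-- `pvD` is permutation-invariant. -/
lemma pvD_perm (l m : List String) (hp : l.Perm m) : pvD l = pvD m := by
  rw [pvD_eq_of l (PySem.Set.ofList m) (PySem.Set.nodup_ofList m)
    (fun x => by rw [PySem.Set.mem_ofList]; exact ⟨fun h => hp.mem_iff.2 h, fun h => hp.mem_iff.1 h⟩)]
  unfold pvD
  have h := List.filter_congr (l := PySem.Set.ofList m)
    (fun x _ => (by simp [hp.count_eq x] :
      (decide (1 < l.count x)) = (decide (1 < m.count x))))
  rw [h]

/-- Peeling the first (maximal) run off `pvD`. -/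
lemma pvD_run (k : Nat) (a : String) (rest : List String) (ha : a ∉ rest) :
    pvD (List.replicate (k + 1) a ++ rest) = (if 1 < k + 1 then 1 else 0) + pvD rest := by
  have hcount : ∀ x, (List.replicate (k + 1) a ++ rest).count x
      = (if x = a then k + 1 else 0) + rest.count x := by
    intro x
    rw [List.count_append, List.count_replicate]
    by_cases hxa : x = a
    · rw [if_pos (by simp [hxa]), if_pos hxa]
    · rw [if_neg (by simp [Ne.symm hxa]), if_neg hxa]
  have hds : (a :: PySem.Set.ofList rest).Nodup := by
    refine List.nodup_cons.2 ⟨?_, PySem.Set.nodup_ofList rest⟩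
    rw [PySem.Set.mem_ofList]; exact ha
  rw [pvD_eq_of _ (a :: PySem.Set.ofList rest) hds ?mem]
  case mem =>
    intro x
    simp only [List.mem_cons, PySem.Set.mem_ofList, List.mem_append, List.mem_replicate]
    constructor
    · rintro (rfl | h)
      · exact Or.inl ⟨by omega, rfl⟩
      · exact Or.inr h
    · rintro (⟨-, rfl⟩ | h)
      · exact Or.inl rfl
      · exact Or.inr h
  rw [List.filter_cons]
  have hca : (List.replicate (k + 1) a ++ rest).count a = k + 1 := by
    rw [hcount a, if_pos rfl, List.count_eq_zero.2 ha]
  have hfeq : ∀ x ∈ PySem.Set.ofList rest,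
      (decide (1 < (List.replicate (k + 1) a ++ rest).count x))
        = (decide (1 < rest.count x)) := by
    intro x hx
    have hxa : x ≠ a := by
      intro h; subst h; exact ha ((PySem.Set.mem_ofList _ _).1 hx)
    rw [hcount x, if_neg hxa]
    simp
  rw [List.filter_congr hfeq]
  unfold pvD
  rw [hca]
  by_cases hk : 1 < k + 1
  · rw [if_pos (by simpa using hk), if_pos hk]
    simp [Int.add_comm]
  · rw [if_neg (by simpa using hk), if_neg hk]
    simp

/-- On a sorted list, the run-length scan counts the distinct duplicated values. -/
lemma pvScan_sorted (n : Nat) : ∀ (s : List String), s.length ≤ n →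
    s.Pairwise (· ≤ ·) → pvScan 0 none 1 s = pvD s := by
  induction n with
  | zero =>
    intro s hs _
    rw [List.length_eq_zero_iff.1 (Nat.le_zero.1 hs)]
    rfl
  | succ n ih =>
    intro s hs hsort
    match s with
    | [] => rfl
    | a :: t =>
      set m := (t.takeWhile (· == a)).length with hm
      set rest := t.dropWhile (· == a) with hrest
      have htw : t.takeWhile (· == a) = List.replicate m a := by
        rw [List.eq_replicate_iff]
        exact ⟨rfl, fun b hb => by
          have := List.mem_takeWhile_imp hb
          exact (beq_iff_eq.1 this)⟩
      have htsplit : t = List.replicate m a ++ rest := by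
        rw [← htw, hrest, List.takeWhile_append_dropWhile]
      have hanotrest : a ∉ rest := by
        intro hmem
        have hsub : rest.Sublist t := hrest ▸ List.dropWhile_sublist _
        cases hr : rest with
        | nil => rw [hr] at hmem; exact absurd hmem (List.not_mem_nil)
        | cons b u =>
          have hb_ne : ¬ (b == a) = true := by
            have := List.head?_dropWhile_not (· == a) t
            rw [← hrest, hr] at this
            simpa using this
          have hba : b ≠ a := fun h => hb_ne (by simp [h])
          rw [hr] at hmem
          rcases List.mem_cons.1 hmem with rfl | hau
          · exact hba rfl
          · -- a ∈ u: pairwise gives a ≤ b (b ∈ t) and b ≤ a (from rest's pairwise)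
            have htp : t.Pairwise (· ≤ ·) := (List.pairwise_cons.1 hsort).2
            have hrp : (b :: u).Pairwise (· ≤ ·) := hr ▸ (htp.sublist hsub)
            have hba' : b ≤ a := (List.pairwise_cons.1 hrp).1 a hau
            have hab : a ≤ b := by
              have hbt : b ∈ t := hsub.mem (hr ▸ List.mem_cons_self)
              exact (List.pairwise_cons.1 hsort).1 b hbt
            exact hba (le_antisymm hba' hab)
      have hstep : pvScan 0 none 1 (a :: t) = pvScan 0 (some a) (1 + m) rest := by
        rw [pvScan, if_neg (by simp)]
        rw [htsplit, if_neg (by norm_num), pvScan_replicate]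
      rw [hstep]
      have hDs : pvD (a :: t) = (if 1 < m + 1 then 1 else 0) + pvD rest := by
        have : a :: t = List.replicate (m + 1) a ++ rest := by
          rw [htsplit, List.replicate_succ, List.cons_append]
        rw [this]
        exact pvD_run m a rest hanotrest
      rw [hDs]
      have hrest_len : rest.length ≤ n := by
        have h1 : rest.Sublist t := hrest ▸ List.dropWhile_sublist _
        have := h1.length_le
        simp at hs
        omega
      have hrest_sorted : rest.Pairwise (· ≤ ·) :=
        (List.pairwise_cons.1 hsort).2.sublist (hrest ▸ List.dropWhile_sublist _)
      have hrec := ih rest hrest_len hrest_sorted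
      cases hr : rest with
      | nil =>
        rw [pvScan]
        have : pvD ([] : List String) = 0 := rfl
        rw [this]
        by_cases h1 : 1 < (1 : Int) + (m : Int)
        · rw [if_pos h1, if_pos (by omega)]; ring
        · rw [if_neg h1, if_neg (by omega)]; ring
      | cons b u =>
        have hb_ne : ¬ ((some a : Option String) == some b) = true := by
          simp only [beq_iff_eq, Option.some.injEq]
          intro h
          exact hanotrest (hr ▸ (h ▸ List.mem_cons_self))
        rw [pvScan, if_neg hb_ne]
        have hnone : pvScan 0 none 1 (b :: u) = pvScan 0 (some b) 1 u := by
          rw [pvScan, if_neg (by simp), if_neg (by norm_num)]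
        rw [hr, hnone] at hrec
        rw [pvScan_add, hrec]
        by_cases h1 : 1 < (1 : Int) + (m : Int)
        · rw [if_pos h1, if_pos (by omega)]; norm_num
        · rw [if_neg h1, if_neg (by omega)]

/-- A's Counter-then-filter computes `pvD` of the phrase list. -/
lemma a_core (l : List String) :
    ((l.foldl (fun d p => PySem.Dict.modify d p 0 (· + 1)) (PySem.Dict.empty : PySem.Dict String Int)).values).foldl
      (fun acc c => if 1 < c then acc + 1 else acc) 0 = pvD l := by
  show ((PySem.Dict.counter l).values).foldl (fun (acc : Int) c => if 1 < c then acc + 1 else acc) 0 = _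
  have hvals : (PySem.Dict.counter l).values
      = (PySem.Set.ofList l).map (fun k => (l.count k : Int)) := by
    have h0 : (PySem.Dict.counter l).values = ((PySem.Dict.counter l).items).map (·.2) := rfl
    rw [h0, PySem.Dict.items_counter, List.map_map]
    rfl
  rw [hvals, PySem.List.foldl_ite_add_one (fun c => 1 < c)]
  rw [List.countP_map, List.countP_eq_length_filter]
  unfold pvD
  simp only [Int.zero_add, Nat.cast_inj]
  congr 1
  apply List.filter_congr
  intro x _
  simp [Function.comp]

/-- The whole equivalence, over the shared word list. -/
lemma main_core (w : List String) :
    ((PySem.List.pyRange 0 (PySem.List.len w - 2) 1).foldl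
      (fun d i =>
        PySem.Dict.modify d (PySem.Str.join " " (PySem.List.slice w (some i) (some (i + 3)))) 0 (· + 1))
      (PySem.Dict.empty : PySem.Dict String Int)).values.foldl
        (fun acc c => if 1 < c then acc + 1 else acc) 0
    = (fun (st : Int × Option String × Int) => if 1 < st.2.2 then st.1 + 1 else st.1)
      ((PySem.List.sorted
          ((w.zip ((w.drop 1).zip (w.drop 2))).map
            (fun t => PySem.Str.join " " [t.1, t.2.1, t.2.2]))
          (fun x => x) false).foldl
        (fun (st : Int × Option String × Int) p =>
          if st.2.1 == some p then (st.1, some p, st.2.2 + 1)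
          else ((if 1 < st.2.2 then st.1 + 1 else st.1), some p, 1))
        (0, none, 1)) := by
  have hlen : PySem.List.len w = (w.length : Int) := rfl
  have hA : (PySem.List.pyRange 0 (PySem.List.len w - 2) 1).foldl
      (fun d i =>
        PySem.Dict.modify d (PySem.Str.join " " (PySem.List.slice w (some i) (some (i + 3)))) 0 (· + 1))
      (PySem.Dict.empty : PySem.Dict String Int)
      = (pvTrig w).foldl (fun d p => PySem.Dict.modify d p 0 (· + 1)) PySem.Dict.empty := by
    rw [hlen, ← range_slice_eq_trig w, List.foldl_map]
  rw [hA, a_core (pvTrig w)]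
  rw [zip_eq_trig w, foldl_eq_scan]
  have hsorted : (PySem.List.sorted (pvTrig w) (fun x => x) false).Pairwise (· ≤ ·) :=
    PySem.List.sorted_pairwise (pvTrig w) (fun x => x)
  rw [pvScan_sorted (PySem.List.sorted (pvTrig w) (fun x => x) false).length _ le_rfl hsorted]
  exact pvD_perm _ _ (PySem.List.sorted_perm (pvTrig w) (fun x => x) false).symm

-- ===== VERDICT (by name: the statement is the Claim_ definition above) =====
theorem detect_repetitive_phrases_py_spec : Claim_equal_detect_repetitive_phrases_py := by
  intro text _
  unfold Spec_detect_repetitive_phrases_py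
  exact main_core (PySem.Str.split₀ (PySem.Str.lower text))
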